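-- pv_equiv track=rewrite | github.com/jpierzchala/whisper-writer | src/ui/status_window.py | format_key_combo
-- ===== SOURCE A (Python) =====
-- def format_key_combo(key_combo: str) -> str:
--     """Convert key combination to symbolic representation."""
--     # Return empty string if key_combo is None
--     if not key_combo:
--         return ''
--
--     key_map = {
--         'ctrl': 'CTRL',
--         'shift': 'SHIFT',
--         'alt': 'ALT',
--         'space': 'SPACE',
--         'win': 'WIN',
--         '+': '',  # Remove the plus signs between keys
--     }
--
--     parts = key_combo.lower().split('+')
--     return ''.join(key_map.get(part, part.upper()) for part in parts)
-- ===== SOURCE B (Python) =====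
-- def format_key_combo(key_combo: str) -> str:
--     """Convert key combination to symbolic representation."""
--     if not key_combo:
--         return ''
--     return key_combo.upper().replace('+', '')
-- ===== Notes on version B (the rewrite author's own statement) =====
-- stated objective: simpler
-- what changed: B drops the lowercase/split/dict-lookup/join pipeline entirely and computes the same result closed-form by uppercasing the string and deleting the plus signs, exploiting that every map value is the uppercase of its key and that joining over a plus-split just deletes the separators.
import Mathlib
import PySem

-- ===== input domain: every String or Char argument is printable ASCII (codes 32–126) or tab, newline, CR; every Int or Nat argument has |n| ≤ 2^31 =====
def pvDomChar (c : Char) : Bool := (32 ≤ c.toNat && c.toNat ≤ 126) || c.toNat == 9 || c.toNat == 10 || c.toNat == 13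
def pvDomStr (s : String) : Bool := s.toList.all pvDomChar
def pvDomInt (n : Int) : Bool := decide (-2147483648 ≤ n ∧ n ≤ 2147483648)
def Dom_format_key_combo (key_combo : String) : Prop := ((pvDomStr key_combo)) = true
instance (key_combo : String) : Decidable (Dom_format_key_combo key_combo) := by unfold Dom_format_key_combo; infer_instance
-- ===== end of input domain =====

-- B replaces A's lowercase/split/dict-lookup/join pipeline with a closed-form uppercase-and-delete-plus transformation (objective: simpler).

-- ===== PORT A =====
-- A's key_map dict literal
def keyMapA : PySem.Dict String String := PySem.Dict.ofList
  [("ctrl", "CTRL"), ("shift", "SHIFT"), ("alt", "ALT"),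
   ("space", "SPACE"), ("win", "WIN"), ("+", "")]

def format_key_combo (key_combo : String) : String :=
  if key_combo == "" then ""
  else
    -- key_combo.lower().split('+')  (sep "+" is nonempty, so Python's split cannot raise)
    let parts : List String :=
      (PySem.Chars.splitOn (PySem.Str.lower key_combo).toList ['+']).map String.ofList
    PySem.Str.join "" (parts.map (fun part => keyMapA.getD part (PySem.Str.upper part)))

-- ===== PORT B =====
def format_key_combo_alt (key_combo : String) : String :=
  if key_combo == "" then ""
  else PySem.Str.replace (PySem.Str.upper key_combo) "+" ""

-- ===== PRECONDITION & SPEC =====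
def Spec_format_key_combo (key_combo : String) (out : String) : Prop := out = format_key_combo_alt key_combo
instance (key_combo : String) (out : String) : Decidable (Spec_format_key_combo key_combo out) := by unfold Spec_format_key_combo; infer_instance

-- ===== CLAIM (what is proved, stated in full; the proofs are below) =====
def Claim_equal_format_key_combo : Prop := ∀ (key_combo : String), Dom_format_key_combo key_combo → Spec_format_key_combo key_combo (format_key_combo key_combo)

-- ===== LEMMAS AND PROOFS =====

-- Reference recursion for splitting a char list at '+' (pre = the chunk collected so far, in order).
def mySplit (pre : List Char) : List Char → List (List Char)
  | [] => [pre]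
  | c :: t => if c = '+' then pre :: mySplit [] t else mySplit (pre ++ [c]) t

theorem go_split (fuel : Nat) : ∀ (l cur : List Char) (acc : List (List Char)), l.length ≤ fuel →
    PySem.Chars.splitOn.go ['+'] fuel l cur acc = acc.reverse ++ mySplit cur.reverse l := by
  induction fuel with
  | zero =>
    intro l cur acc h
    have hl : l = [] := List.eq_nil_of_length_eq_zero (Nat.le_zero.mp h)
    subst hl
    rw [PySem.Chars.splitOn.go.eq_def]
    simp [mySplit]
  | succ n ih =>
    intro l cur acc h
    cases l with
    | nil =>
      rw [PySem.Chars.splitOn.go.eq_def]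
      simp [mySplit]
    | cons c rest =>
      have hrest : rest.length ≤ n := by simpa using Nat.le_of_succ_le_succ h
      rw [PySem.Chars.splitOn.go.eq_def]
      simp only [List.isPrefixOf, Bool.and_eq_true, beq_iff_eq]
      by_cases hc : c = '+'
      · rw [if_pos ⟨hc.symm, trivial⟩, ih _ _ _ (by simpa using hrest)]
        simp [mySplit, hc]
      · rw [if_neg (by exact fun hh => hc hh.1.symm), ih _ _ _ hrest]
        simp [mySplit, hc]

theorem splitOn_eq_mySplit (l : List Char) :
    PySem.Chars.splitOn l ['+'] = mySplit [] l := by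
  show PySem.Chars.splitOn.go ['+'] (l.length + 1) l [] [] = mySplit [] l
  rw [go_split (l.length + 1) l [] [] (Nat.le_succ _)]
  rfl

theorem go_replace (fuel : Nat) : ∀ (l acc : List Char), l.length ≤ fuel →
    PySem.Chars.replace.go ['+'] [] fuel l acc = acc.reverse ++ l.filter (· ≠ '+') := by
  induction fuel with
  | zero =>
    intro l acc h
    have hl : l = [] := List.eq_nil_of_length_eq_zero (Nat.le_zero.mp h)
    subst hl
    rw [PySem.Chars.replace.go.eq_def]
    simp
  | succ n ih =>
    intro l acc h
    cases l with
    | nil => rw [PySem.Chars.replace.go.eq_def]; simp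
    | cons c rest =>
      have hrest : rest.length ≤ n := by simpa using Nat.le_of_succ_le_succ h
      rw [PySem.Chars.replace.go.eq_def]
      simp only [List.isPrefixOf, Bool.and_eq_true, beq_iff_eq]
      by_cases hc : c = '+'
      · rw [if_pos ⟨hc.symm, trivial⟩, ih _ _ (by simpa using hrest)]
        simp [hc, List.filter]
      · rw [if_neg (by exact fun hh => hc hh.1.symm), ih _ _ hrest]
        simp [List.filter, hc]

theorem replace_plus (l : List Char) :
    PySem.Chars.replace l ['+'] [] = l.filter (· ≠ '+') := by
  rw [PySem.Chars.replace]
  simp only [List.isEmpty_cons, if_false, Bool.false_eq_true]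
  exact go_replace l.length l [] (le_refl _)

theorem char_toNat_ofNat (n : Nat) (h : n < 55296) : (Char.ofNat n).toNat = n := by
  rw [Char.ofNat, dif_pos (by left; exact h)]
  exact UInt32.toNat_ofNatLT

theorem char_eq_of_toNat (a b : Char) (h : a.toNat = b.toNat) : a = b := by
  apply Char.ext; exact UInt32.toNat_inj.mp h

theorem char_le_iff (a b : Char) : a ≤ b ↔ a.toNat ≤ b.toNat := by
  rw [Char.le_def, UInt32.le_iff_toNat_le]; rfl

theorem islower_iff (c : Char) : PySem.Chars.islower c = true ↔ 97 ≤ c.toNat ∧ c.toNat ≤ 122 := by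
  rw [PySem.Chars.islower]
  simp only [Bool.and_eq_true, decide_eq_true_eq, char_le_iff]
  exact Iff.rfl

theorem isupper_iff (c : Char) : PySem.Chars.isupper c = true ↔ 65 ≤ c.toNat ∧ c.toNat ≤ 90 := by
  rw [PySem.Chars.isupper]
  simp only [Bool.and_eq_true, decide_eq_true_eq, char_le_iff]
  exact Iff.rfl

theorem upperChar_lowerChar (c : Char) :
    PySem.Chars.upperChar (PySem.Chars.lowerChar c) = PySem.Chars.upperChar c := by
  rw [PySem.Chars.lowerChar, PySem.Chars.upperChar, PySem.Chars.upperChar]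
  by_cases hu : PySem.Chars.isupper c = true
  · obtain ⟨h0, h1⟩ := (isupper_iff c).mp hu
    have ht : (Char.ofNat (c.toNat + 32)).toNat = c.toNat + 32 := char_toNat_ofNat _ (by omega)
    rw [if_pos hu]
    rw [if_pos ((islower_iff _).mpr (by omega))]
    rw [if_neg (by rw [islower_iff]; omega)]
    rw [ht]
    exact char_eq_of_toNat _ _ (by rw [char_toNat_ofNat _ (by omega)]; omega)
  · rw [if_neg hu]

theorem upperChar_ne_plus {c : Char} (hc : c ≠ '+') : PySem.Chars.upperChar c ≠ '+' := by
  rw [PySem.Chars.upperChar]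
  by_cases hl : PySem.Chars.islower c = true
  · obtain ⟨h0, h1⟩ := (islower_iff c).mp hl
    rw [if_pos hl]
    intro h
    have h' := congrArg Char.toNat h
    rw [char_toNat_ofNat _ (by omega)] at h'
    have : c.toNat - 32 = 43 := h'
    omega
  · rw [if_neg hl]; exact hc

theorem upperChar_plus_eq : PySem.Chars.upperChar '+' = '+' := by decide

theorem join_nil_cons (a : List Char) (parts : List (List Char)) :
    PySem.Chars.join [] (a :: parts) = a ++ PySem.Chars.join [] parts := by
  cases parts with
  | nil => simp [PySem.Chars.join, List.intercalate]
  | cons b t => rw [PySem.Chars.join_cons_cons]; simp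

-- every chunk produced by mySplit is '+'-free
theorem mySplit_no_plus : ∀ (l pre p : List Char), '+' ∉ pre → p ∈ mySplit pre l → '+' ∉ p := by
  intro l
  induction l with
  | nil =>
    intro pre p hpre hp
    simp [mySplit] at hp
    subst hp; exact hpre
  | cons c t ih =>
    intro pre p hpre hp
    rw [mySplit] at hp
    by_cases hc : c = '+'
    · rw [if_pos hc] at hp
      rcases List.mem_cons.mp hp with h | h
      · subst h; exact hpre
      · exact ih [] p (by simp) h
    · rw [if_neg hc] at hp
      exact ih (pre ++ [c]) p (by simp [hpre, Ne.symm hc]) hp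

-- upper-joining the chunks of l is filtering '+' out of upper l
theorem join_upper_mySplit : ∀ (l pre : List Char),
    PySem.Chars.join [] ((mySplit pre l).map PySem.Chars.upper)
      = PySem.Chars.upper pre ++ (PySem.Chars.upper l).filter (· ≠ '+') := by
  intro l
  induction l with
  | nil => intro pre; simp [mySplit, PySem.Chars.join, List.intercalate, PySem.Chars.upper]
  | cons c t ih =>
    intro pre
    rw [mySplit]
    by_cases hc : c = '+'
    · rw [if_pos hc]
      simp only [List.map_cons, join_nil_cons, ih []]
      subst hc
      simp [PySem.Chars.upper, upperChar_plus_eq]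
    · rw [if_neg hc]
      rw [ih (pre ++ [c])]
      have : PySem.Chars.upperChar c ≠ '+' := upperChar_ne_plus hc
      simp [PySem.Chars.upper, this]

theorem keyMap_getD (p : List Char) (hp : '+' ∉ p) :
    (keyMapA.getD (String.ofList p) (PySem.Str.upper (String.ofList p))).toList
      = PySem.Chars.upper p := by
  have htl : (String.ofList p).toList = p := by simp
  by_cases h1 : String.ofList p = "ctrl"
  · rw [h1]; have : p = "ctrl".toList := by rw [← htl, h1]
    subst this; decide
  · by_cases h2 : String.ofList p = "shift"
    · rw [h2]; have : p = "shift".toList := by rw [← htl, h2]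
      subst this; decide
    · by_cases h3 : String.ofList p = "alt"
      · rw [h3]; have : p = "alt".toList := by rw [← htl, h3]
        subst this; decide
      · by_cases h4 : String.ofList p = "space"
        · rw [h4]; have : p = "space".toList := by rw [← htl, h4]
          subst this; decide
        · by_cases h5 : String.ofList p = "win"
          · rw [h5]; have : p = "win".toList := by rw [← htl, h5]
            subst this; decide
          · have h6 : String.ofList p ≠ "+" := by
              intro h; apply hp; rw [← htl, h]; decide
            rw [show keyMapA.getD (String.ofList p) (PySem.Str.upper (String.ofList p)) = PySem.Str.upper (String.ofList p) from by
              have b1 : (("ctrl":String) == String.ofList p) = false := beq_eq_false_iff_ne.mpr (Ne.symm h1)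
              have b2 : (("shift":String) == String.ofList p) = false := beq_eq_false_iff_ne.mpr (Ne.symm h2)
              have b3 : (("alt":String) == String.ofList p) = false := beq_eq_false_iff_ne.mpr (Ne.symm h3)
              have b4 : (("space":String) == String.ofList p) = false := beq_eq_false_iff_ne.mpr (Ne.symm h4)
              have b5 : (("win":String) == String.ofList p) = false := beq_eq_false_iff_ne.mpr (Ne.symm h5)
              have b6 : (("+":String) == String.ofList p) = false := beq_eq_false_iff_ne.mpr (Ne.symm h6)
              have hi : keyMapA.items = [("ctrl","CTRL"),("shift","SHIFT"),("alt","ALT"),("space","SPACE"),("win","WIN"),("+","")] := by decide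
              simp [PySem.Dict.getD, PySem.Dict.get?, hi, List.find?, b1, b2, b3, b4, b5, b6]]
            rw [PySem.Str.toList_upper, htl]

theorem upper_lower (l : List Char) :
    PySem.Chars.upper (PySem.Chars.lower l) = PySem.Chars.upper l := by
  rw [PySem.Chars.upper, PySem.Chars.lower, PySem.Chars.upper, List.map_map]
  exact List.map_congr_left (fun c _ => upperChar_lowerChar c)

-- ===== VERDICT (by name: the statement is the Claim_ definition above) =====
theorem format_key_combo_spec : Claim_equal_format_key_combo := by
  intro key_combo _
  unfold Spec_format_key_combo format_key_combo format_key_combo_alt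
  by_cases h0 : key_combo == ""
  · rw [if_pos h0, if_pos h0]
  · rw [if_neg h0, if_neg h0]
    simp only [PySem.Str.join, PySem.Str.replace]
    refine congrArg String.ofList ?_
    rw [PySem.Str.toList_upper]
    rw [show ("+" : String).toList = ['+'] from rfl, show ("" : String).toList = ([] : List Char) from rfl]
    rw [PySem.Str.toList_lower, splitOn_eq_mySplit, List.map_map, List.map_map]
    simp only [Function.comp_def]
    rw [List.map_congr_left
      (fun p hp => keyMap_getD p (mySplit_no_plus (PySem.Chars.lower key_combo.toList) [] p (by simp) hp))]
    rw [join_upper_mySplit, replace_plus, upper_lower]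
    rfl
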